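-- pv_equiv track=rewrite | github.com/VadymZhernovyiBV/ai-feedback-analyzer | backend/app/utils/validators.py | validate_tags
-- ===== SOURCE A (Python) =====
-- from typing import List, Optional
--
-- def validate_tags(tags: Optional[List[str]]) -> List[str]:
--     """Validate and clean tags list."""
--     if not tags:
--         return []
--
--     cleaned_tags = []
--     for tag in tags:
--         if not isinstance(tag, str):
--             continue
--
--         cleaned_tag = tag.strip()
--         if cleaned_tag and len(cleaned_tag) <= 50:
--             cleaned_tags.append(cleaned_tag)
--
--     # Remove duplicates while preserving order
--     seen = set()
--     unique_tags = []
--     for tag in cleaned_tags: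
--         if tag.lower() not in seen:
--             seen.add(tag.lower())
--             unique_tags.append(tag)
--
--     return unique_tags[:10]  # Limit to 10 tags
-- ===== SOURCE B (Python) =====
-- def validate_tags(tags):
--     """Validate and clean tags list (single fused pass)."""
--     if not tags:
--         return []
--     seen = set()
--     result = []
--     for tag in tags:
--         if not isinstance(tag, str):
--             continue
--         t = tag.strip()
--         if not t or len(t) > 50:
--             continue
--         low = t.lower()
--         if low in seen:
--             continue
--         seen.add(low)
--         result.append(t)
--         if len(result) == 10:
--             break
--     return result
-- ===== Notes on version B (the rewrite author's own statement) =====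
-- stated objective: faster
-- what changed: A cleans every tag into a list, deduplicates in a second full pass, then slices to 10; B is one fused loop that cleans, dedups and breaks as soon as 10 tags are kept, so it never processes the rest of a large list.
import Mathlib
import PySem

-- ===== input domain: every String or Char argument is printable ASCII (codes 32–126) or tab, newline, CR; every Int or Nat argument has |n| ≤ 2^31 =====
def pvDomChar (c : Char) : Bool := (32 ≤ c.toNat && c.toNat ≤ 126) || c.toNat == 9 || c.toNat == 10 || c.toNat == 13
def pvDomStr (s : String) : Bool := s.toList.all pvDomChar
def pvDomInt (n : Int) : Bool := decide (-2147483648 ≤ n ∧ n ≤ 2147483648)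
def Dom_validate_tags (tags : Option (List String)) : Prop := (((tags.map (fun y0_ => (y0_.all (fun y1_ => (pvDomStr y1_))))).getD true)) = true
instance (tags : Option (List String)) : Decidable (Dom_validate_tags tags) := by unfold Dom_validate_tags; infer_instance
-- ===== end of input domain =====

-- B fuses A's two passes (clean, then case-insensitive dedup) and the [:10] cut into one
-- loop with an early break once 10 tags are kept; alternative decomposition, same cost class.

-- ===== PORT A =====
def validate_tags (tags : Option (List String)) : List String :=
  match tags with
  | none => []
  | some ts =>
    if ts.isEmpty then []          -- 'if not tags: return []'
    else
      let cleaned := ts.foldl (fun acc tag =>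
        let c := PySem.Str.strip tag
        if c ≠ "" ∧ PySem.Str.len c ≤ 50 then acc ++ [c] else acc) []
      let p := cleaned.foldl (fun (p : PySem.Set String × List String) tag =>
        if PySem.Set.contains p.1 (PySem.Str.lower tag) then p
        else (PySem.Set.add p.1 (PySem.Str.lower tag), p.2 ++ [tag]))
        (PySem.Set.empty, [])
      PySem.List.slice p.2 none (some 10)

-- ===== PORT B =====
def vtAltLoop : List String → PySem.Set String → List String → List String
  | [], _, res => res
  | tag :: rest, seen, res =>
    let t := PySem.Str.strip tag
    if t = "" ∨ 50 < PySem.Str.len t then vtAltLoop rest seen res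
    else
      let low := PySem.Str.lower t
      if PySem.Set.contains seen low then vtAltLoop rest seen res
      else
        let res' := res ++ [t]
        if res'.length = 10 then res' else vtAltLoop rest (PySem.Set.add seen low) res'

def validate_tags_alt (tags : Option (List String)) : List String :=
  match tags with
  | none => []
  | some ts =>
    if ts.isEmpty then []
    else vtAltLoop ts PySem.Set.empty []

-- ===== PRECONDITION & SPEC =====
def Spec_validate_tags (tags : Option (List String)) (out : List String) : Prop := out = validate_tags_alt tags
instance (tags : Option (List String)) (out : List String) : Decidable (Spec_validate_tags tags out) := by unfold Spec_validate_tags; infer_instance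

-- ===== CLAIM (what is proved, stated in full; the proofs are below) =====
def Claim_equal_validate_tags : Prop := ∀ (tags : Option (List String)), Dom_validate_tags tags → Spec_validate_tags tags (validate_tags tags)

-- ===== LEMMAS AND PROOFS =====

-- the cleaned list, as a structural recursion
def vtClean : List String → List String
  | [] => []
  | tag :: rest =>
    let c := PySem.Str.strip tag
    if c ≠ "" ∧ PySem.Str.len c ≤ 50 then c :: vtClean rest else vtClean rest

-- case-insensitive ordered dedup starting from a given seen-set
def vtDedup : PySem.Set String → List String → List String
  | _, [] => []
  | seen, t :: rest =>
    if PySem.Set.contains seen (PySem.Str.lower t) then vtDedup seen rest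
    else t :: vtDedup (PySem.Set.add seen (PySem.Str.lower t)) rest

theorem vtClean_foldl (ts : List String) (acc : List String) :
    ts.foldl (fun acc tag =>
      let c := PySem.Str.strip tag
      if c ≠ "" ∧ PySem.Str.len c ≤ 50 then acc ++ [c] else acc) acc
    = acc ++ vtClean ts := by
  induction ts generalizing acc with
  | nil => simp [vtClean]
  | cons t rest ih =>
    rw [List.foldl_cons, vtClean]
    dsimp only
    by_cases h : PySem.Str.strip t ≠ "" ∧ PySem.Str.len (PySem.Str.strip t) ≤ 50
    · rw [if_pos h, if_pos h, ih]; simp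
    · rw [if_neg h, if_neg h, ih]

theorem vtDedup_foldl (ts : List String) (seen : PySem.Set String) (acc : List String) :
    (ts.foldl (fun (p : PySem.Set String × List String) tag =>
      if PySem.Set.contains p.1 (PySem.Str.lower tag) then p
      else (PySem.Set.add p.1 (PySem.Str.lower tag), p.2 ++ [tag])) (seen, acc)).2
    = acc ++ vtDedup seen ts := by
  induction ts generalizing seen acc with
  | nil => simp [vtDedup]
  | cons t rest ih =>
    rw [List.foldl_cons, vtDedup]
    dsimp only
    by_cases h : PySem.Set.contains seen (PySem.Str.lower t) = true
    · rw [if_pos h, if_pos h, ih]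
    · rw [if_neg h, if_neg h, ih]; simp

theorem vtAltLoop_eq (ts : List String) (seen : PySem.Set String) (res : List String)
    (h : res.length < 10) :
    vtAltLoop ts seen res = res ++ (vtDedup seen (vtClean ts)).take (10 - res.length) := by
  induction ts generalizing seen res with
  | nil => simp [vtAltLoop, vtClean, vtDedup]
  | cons tag rest ih =>
    simp only [vtAltLoop, vtClean]
    by_cases hbad : PySem.Str.strip tag = "" ∨ 50 < PySem.Str.len (PySem.Str.strip tag)
    · have hcl : ¬(PySem.Str.strip tag ≠ "" ∧ PySem.Str.len (PySem.Str.strip tag) ≤ 50) :=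
        fun hc => hbad.elim (fun h1 => hc.1 h1) (fun h2 => absurd hc.2 (not_le.mpr h2))
      rw [if_pos hbad, if_neg hcl]
      exact ih seen res h
    · have h1 : PySem.Str.strip tag ≠ "" := fun e => hbad (Or.inl e)
      have h2 : PySem.Str.len (PySem.Str.strip tag) ≤ 50 := le_of_not_gt fun g => hbad (Or.inr g)
      have hgood : PySem.Str.strip tag ≠ "" ∧ PySem.Str.len (PySem.Str.strip tag) ≤ 50 := ⟨h1, h2⟩
      rw [if_neg hbad, if_pos hgood]
      simp only [vtDedup]
      by_cases hseen : PySem.Set.contains seen (PySem.Str.lower (PySem.Str.strip tag)) = true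
      · rw [if_pos hseen, if_pos hseen]
        exact ih seen res h
      · rw [if_neg hseen, if_neg hseen]
        by_cases hfull : (res ++ [PySem.Str.strip tag]).length = 10
        · rw [if_pos hfull]
          have h1 : 10 - res.length = 1 := by simp at hfull; omega
          simp [h1]
        · rw [if_neg hfull]
          have hlt : (res ++ [PySem.Str.strip tag]).length < 10 := by
            simp at hfull ⊢; omega
          rw [ih _ _ hlt]
          have h2 : 10 - res.length = (10 - (res ++ [PySem.Str.strip tag]).length) + 1 := by
            simp; omega
          simp [h2, List.take_succ_cons]

-- ===== VERDICT (by name: the statement is the Claim_ definition above) =====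
theorem validate_tags_spec : Claim_equal_validate_tags := by
  intro tags _
  unfold Spec_validate_tags validate_tags validate_tags_alt
  rcases tags with _ | ts
  · rfl
  · dsimp only
    by_cases he : ts.isEmpty
    · simp [he]
    · rw [if_neg he, if_neg he]
      rw [vtClean_foldl, vtDedup_foldl, vtAltLoop_eq ts PySem.Set.empty [] (by simp),
          PySem.List.slice_to _ (by norm_num)]
      simp
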